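-- pv_equiv track=rewrite | github.com/mcleanT/AutoReview | autoreview/output/formatter.py | _markdown_to_latex
-- ===== SOURCE A (Python) =====
-- def _latex_escape(text: str) -> str:
--     """Escape special LaTeX characters."""
--     special = {"&": r"\&", "%": r"\%", "$": r"\$", "#": r"\#", "_": r"\_",
--                "{": r"\{", "}": r"\}", "~": r"\textasciitilde{}", "^": r"\^{}"}
--     for char, replacement in special.items():
--         text = text.replace(char, replacement)
--     return text
--
-- def _markdown_to_latex(md: str) -> str:
--     """Basic Markdown to LaTeX conversion (full document).
--
--     Kept for backward compatibility. For new code, prefer using the Jinja2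
--     template with ``_markdown_body_to_latex`` for body conversion.
--     """
--     lines = md.split("\n")
--     result = [
--         r"\documentclass{article}",
--         r"\usepackage[utf8]{inputenc}",
--         r"\usepackage{hyperref}",
--         r"\begin{document}",
--         "",
--     ]
--
--     for line in lines:
--         if line.startswith("# "):
--             result.append(f"\\title{{{_latex_escape(line[2:])}}}")
--             result.append(r"\maketitle")
--         elif line.startswith("## "):
--             result.append(f"\\section{{{_latex_escape(line[3:])}}}")
--         elif line.startswith("### "):
--             result.append(f"\\subsection{{{_latex_escape(line[4:])}}}")
--         elif line.startswith("#### "):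
--             result.append(f"\\subsubsection{{{_latex_escape(line[5:])}}}")
--         else:
--             result.append(line)
--
--     result.append(r"\end{document}")
--     return "\n".join(result)
-- ===== SOURCE B (Python) =====
-- _ESCAPES = {"&": r"\&", "%": r"\%", "$": r"\$", "#": r"\#", "_": r"\_",
--             "{": r"\{", "}": r"\}", "~": r"\textasciitilde{}", "^": r"\^{}"}
--
-- _CMDS = {2: "section", 3: "subsection", 4: "subsubsection"}
--
-- _PREAMBLE = [
--     r"\documentclass{article}",
--     r"\usepackage[utf8]{inputenc}",
--     r"\usepackage{hyperref}",
--     r"\begin{document}",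
--     "",
-- ]
--
--
-- def _escape(text: str) -> str:
--     return "".join(_ESCAPES.get(c, c) for c in text)
--
--
-- def _convert_line(line: str) -> list:
--     level = len(line) - len(line.lstrip("#"))
--     if 1 <= level <= 4 and len(line) > level and line[level] == " ":
--         content = _escape(line[level + 1:])
--         if level == 1:
--             return ["\\title{%s}" % content, r"\maketitle"]
--         return ["\\%s{%s}" % (_CMDS[level], content)]
--     return [line]
--
--
-- def _markdown_to_latex(md: str) -> str:
--     body = [out for line in md.split("\n") for out in _convert_line(line)]
--     return "\n".join(_PREAMBLE + body + [r"\end{document}"])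
-- ===== Notes on version B (the rewrite author's own statement) =====
-- stated objective: simpler
-- what changed: B replaces the four explicit startswith prefix tests with one leading-hash count plus a level-keyed dispatch, and replaces the nine sequential whole-string replace passes of the escape with a single per-character pass.
import Mathlib
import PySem

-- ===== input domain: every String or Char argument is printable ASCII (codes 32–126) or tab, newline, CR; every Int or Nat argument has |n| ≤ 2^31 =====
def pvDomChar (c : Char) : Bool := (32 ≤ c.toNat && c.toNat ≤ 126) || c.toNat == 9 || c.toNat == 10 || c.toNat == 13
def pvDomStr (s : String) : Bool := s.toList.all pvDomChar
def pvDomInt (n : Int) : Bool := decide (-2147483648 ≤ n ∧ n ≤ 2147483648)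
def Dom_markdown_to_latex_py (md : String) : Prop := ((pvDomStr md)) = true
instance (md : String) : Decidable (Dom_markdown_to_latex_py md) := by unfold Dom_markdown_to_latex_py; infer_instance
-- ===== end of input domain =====

-- B replaces the four startswith prefix tests by one leading-hash count with a level dispatch and the
-- sequential 9-pass escape by a single per-character pass (objective: simpler).

-- ===== PORT A =====
-- the escape dict of A, as an association list in the same insertion order
def pvSpecialA : List (List Char × List Char) :=
  [(['&'], "\\&".toList), (['%'], "\\%".toList), (['$'], "\\$".toList), (['#'], "\\#".toList),
   (['_'], "\\_".toList), (['{'], "\\{".toList), (['}'], "\\}".toList),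
   (['~'], "\\textasciitilde{}".toList), (['^'], "\\^{}".toList)]

-- _latex_escape: one replace per dict entry, in order
def pvEscA (text : List Char) : List Char :=
  pvSpecialA.foldl (fun t p => PySem.Chars.replace t p.1 p.2) text

def pvPreamble : List (List Char) :=
  ["\\documentclass{article}".toList, "\\usepackage[utf8]{inputenc}".toList,
   "\\usepackage{hyperref}".toList, "\\begin{document}".toList, []]

-- the loop body of A: the appends done for one line
def pvStepA (res : List (List Char)) (line : List Char) : List (List Char) :=
  if PySem.Chars.startswith line "# ".toList then
    (res ++ ["\\title{".toList ++ pvEscA (PySem.List.slice line (some 2) none) ++ ['}']])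
      ++ ["\\maketitle".toList]
  else if PySem.Chars.startswith line "## ".toList then
    res ++ ["\\section{".toList ++ pvEscA (PySem.List.slice line (some 3) none) ++ ['}']]
  else if PySem.Chars.startswith line "### ".toList then
    res ++ ["\\subsection{".toList ++ pvEscA (PySem.List.slice line (some 4) none) ++ ['}']]
  else if PySem.Chars.startswith line "#### ".toList then
    res ++ ["\\subsubsection{".toList ++ pvEscA (PySem.List.slice line (some 5) none) ++ ['}']]
  else
    res ++ [line]

def markdown_to_latex_py (md : String) : String :=
  let lines := PySem.Chars.splitOn md.toList ['\n']
  let result := lines.foldl pvStepA pvPreamble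
  let result := result ++ ["\\end{document}".toList]
  String.mk (PySem.Chars.join ['\n'] result)

-- ===== PORT B =====
def pvEscMapB : List (Char × List Char) :=
  [('&', "\\&".toList), ('%', "\\%".toList), ('$', "\\$".toList), ('#', "\\#".toList),
   ('_', "\\_".toList), ('{', "\\{".toList), ('}', "\\}".toList),
   ('~', "\\textasciitilde{}".toList), ('^', "\\^{}".toList)]

-- _ESCAPES.get(c, c) on the literal dict (distinct keys): first-match lookup with default
def pvEscCharB (c : Char) : List Char := (pvEscMapB.lookup c).getD [c]

-- _escape: "".join of the per-character images
def pvEscB (text : List Char) : List Char := PySem.Chars.join [] (text.map pvEscCharB)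

def pvCmdsB : List (Nat × List Char) :=
  [(2, "section".toList), (3, "subsection".toList), (4, "subsubsection".toList)]

-- _convert_line; line.lstrip("#") is dropWhile (· == '#') (exact: lstrip with a one-char set),
-- line[level+1:] with level+1 ≥ 0 is List.drop (exact for a nonnegative lower bound)
def pvLineB (line : List Char) : List (List Char) :=
  let level := line.length - (line.dropWhile (· == '#')).length
  if 1 ≤ level ∧ level ≤ 4 ∧ level < line.length ∧ PySem.List.pyGet? line (level : Int) = some ' ' then
    let content := pvEscB (line.drop (level + 1))
    if level = 1 then
      ["\\title{".toList ++ content ++ ['}'], "\\maketitle".toList]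
    else
      [['\\'] ++ (pvCmdsB.lookup level).getD [] ++ ['{'] ++ content ++ ['}']]
  else
    [line]

def pvPreambleB : List (List Char) :=
  ["\\documentclass{article}".toList, "\\usepackage[utf8]{inputenc}".toList,
   "\\usepackage{hyperref}".toList, "\\begin{document}".toList, []]

def markdown_to_latex_py_alt (md : String) : String :=
  let body := (PySem.Chars.splitOn md.toList ['\n']).flatMap pvLineB
  String.mk (PySem.Chars.join ['\n'] (pvPreambleB ++ body ++ ["\\end{document}".toList]))

-- ===== PRECONDITION & SPEC =====
def Spec_markdown_to_latex_py (md : String) (out : String) : Prop := out = markdown_to_latex_py_alt md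
instance (md : String) (out : String) : Decidable (Spec_markdown_to_latex_py md out) := by unfold Spec_markdown_to_latex_py; infer_instance

-- ===== CLAIM (what is proved, stated in full; the proofs are below) =====
def Claim_equal_markdown_to_latex_py : Prop := ∀ (md : String), Dom_markdown_to_latex_py md → Spec_markdown_to_latex_py md (markdown_to_latex_py md)

-- ===== LEMMAS AND PROOFS =====

theorem pv_replace_go_single (a : Char) (r : List Char) :
    ∀ (s : List Char) (fuel : Nat) (acc : List Char), s.length ≤ fuel →
      PySem.Chars.replace.go [a] r fuel s acc
        = acc.reverse ++ s.flatMap (fun c => if c == a then r else [c]) := by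
  intro s
  induction s with
  | nil =>
    intro fuel acc _
    cases fuel <;> simp [PySem.Chars.replace.go]
  | cons c t ih =>
    intro fuel acc hle
    cases fuel with
    | zero => simp at hle
    | succ f =>
      rw [PySem.Chars.replace.go]
      by_cases h : a = c
      · subst h
        have hp : List.isPrefixOf [a] (a :: t) = true := by simp [List.isPrefixOf]
        simp only [hp, if_true]
        rw [show List.drop [a].length (a :: t) = t from rfl, ih f (r.reverse ++ acc)
          (by simp at hle; omega)]
        simp
      · have hp : List.isPrefixOf [a] (c :: t) = false := by simp [List.isPrefixOf, h]
        simp only [hp, if_false]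
        rw [ih f (c :: acc) (by simp at hle; omega)]
        simp [Ne.symm h]

theorem pv_replace_single (s : List Char) (a : Char) (r : List Char) :
    PySem.Chars.replace s [a] r = s.flatMap (fun c => if c == a then r else [c]) := by
  rw [PySem.Chars.replace, if_neg (by simp)]
  rw [pv_replace_go_single a r s s.length [] (le_refl _)]
  simp

theorem pv_join_nil (l : List (List Char)) : PySem.Chars.join [] l = l.flatten := by
  simp only [PySem.Chars.join, List.intercalate]
  induction l with
  | nil => rfl
  | cons a t ih => cases t <;> simp_all [List.intersperse]

set_option maxHeartbeats 2000000 in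
theorem pv_esc_eq (s : List Char) : pvEscA s = pvEscB s := by
  simp only [pvEscA, pvSpecialA, List.foldl_cons, List.foldl_nil, pv_replace_single,
    List.flatMap_assoc, pvEscB, pv_join_nil, ← List.flatMap_def]
  induction s with
  | nil => rfl
  | cons c t ih =>
    simp only [List.flatMap_cons, ih]
    congr 1
    by_cases h1 : c = '&'; · subst h1; decide
    by_cases h2 : c = '%'; · subst h2; decide
    by_cases h3 : c = '$'; · subst h3; decide
    by_cases h4 : c = '#'; · subst h4; decide
    by_cases h5 : c = '_'; · subst h5; decide
    by_cases h6 : c = '{'; · subst h6; decide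
    by_cases h7 : c = '}'; · subst h7; decide
    by_cases h8 : c = '~'; · subst h8; decide
    by_cases h9 : c = '^'; · subst h9; decide
    have e1 : (c == '&') = false := by simp [h1]
    have e2 : (c == '%') = false := by simp [h2]
    have e3 : (c == '$') = false := by simp [h3]
    have e4 : (c == '#') = false := by simp [h4]
    have e5 : (c == '_') = false := by simp [h5]
    have e6 : (c == '{') = false := by simp [h6]
    have e7 : (c == '}') = false := by simp [h7]
    have e8 : (c == '~') = false := by simp [h8]
    have e9 : (c == '^') = false := by simp [h9]
    simp [pvEscCharB, pvEscMapB, List.lookup, e1, e2, e3, e4, e5, e6, e7, e8, e9, h1, h2, h3, h4, h5, h6, h7, h8, h9]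

theorem pvLineB_raw (line : List Char)
    (h : ¬ (1 ≤ line.length - (line.dropWhile (· == '#')).length ∧
        line.length - (line.dropWhile (· == '#')).length ≤ 4 ∧
        line.length - (line.dropWhile (· == '#')).length < line.length ∧
        PySem.List.pyGet? line ((line.length - (line.dropWhile (· == '#')).length : Nat) : Int) = some ' ')) :
    pvLineB line = [line] := by
  simp only [pvLineB]
  rw [if_neg h]

theorem pv_step_eq (res : List (List Char)) (line : List Char) :
    pvStepA res line = res ++ pvLineB line := by
  obtain _ | ⟨c, line⟩ := line
  · simp [pvStepA, PySem.Chars.startswith, List.isPrefixOf]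
    rw [show pvLineB [] = [[]] from by decide]

  by_cases hh : c = '#'
  case neg =>
    have e : (c == '#') = false := by simp [hh]
    have e' : ('#' == c) = false := by simp [Ne.symm hh]
    have hlev : (c::line).length - ((c::line).dropWhile (· == '#')).length = 0 := by
      simp [List.dropWhile, e]
    simp only [pvStepA]
    rw [pvLineB_raw _ (by rw [hlev]; simp [hh])]
    simp [PySem.Chars.startswith, List.isPrefixOf, e']
  subst hh

  obtain _ | ⟨c, line⟩ := line
  · simp [pvStepA, PySem.Chars.startswith, List.isPrefixOf]
    rw [show pvLineB ['#'] = [['#']] from by decide]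

  by_cases hsp : c = ' '
  · subst hsp
    have hlev : ('#'::' '::line).length - (('#'::' '::line).dropWhile (· == '#')).length = 1 := by
      simp [List.dropWhile]
    simp only [pvStepA]
    rw [if_pos (by simp [PySem.Chars.startswith, List.isPrefixOf])]
    rw [PySem.List.slice_from _ (by norm_num)]
    simp only [pvLineB, hlev]
    norm_num
    simp [pv_esc_eq, pvCmdsB, List.lookup, PySem.List.pyGet?, PySem.List.pyIdx?,
      show ((1:Int)) ≤ (line.length:Int) + 1 by omega]

  by_cases hh : c = '#'
  case neg =>
    have e : (c == '#') = false := by simp [hh]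
    have e' : ('#' == c) = false := by simp [Ne.symm hh]
    have es' : (' ' == c) = false := by simp [Ne.symm hsp]
    have hlev : ('#'::c::line).length - (('#'::c::line).dropWhile (· == '#')).length = 1 := by
      simp [List.dropWhile, e]
    simp only [pvStepA]
    rw [pvLineB_raw _ (by rw [hlev]; simp [hsp, hh, PySem.List.pyGet?, PySem.List.pyIdx?,
        show ((1:Int)) ≤ (line.length:Int) + 1 by omega])]
    simp [PySem.Chars.startswith, List.isPrefixOf, e', es']
  subst hh

  obtain _ | ⟨c, line⟩ := line
  · simp [pvStepA, PySem.Chars.startswith, List.isPrefixOf]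
    rw [show pvLineB ['#','#'] = [['#','#']] from by decide]

  by_cases hsp : c = ' '
  · subst hsp
    have hlev : ('#'::'#'::' '::line).length - (('#'::'#'::' '::line).dropWhile (· == '#')).length = 2 := by
      simp [List.dropWhile]
    simp only [pvStepA]
    rw [if_neg (by simp [PySem.Chars.startswith, List.isPrefixOf])]
    rw [if_pos (by simp [PySem.Chars.startswith, List.isPrefixOf])]
    rw [PySem.List.slice_from _ (by norm_num)]
    simp only [pvLineB, hlev]
    norm_num
    simp [pv_esc_eq, pvCmdsB, List.lookup, PySem.List.pyGet?, PySem.List.pyIdx?,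
      show ((2:Int)) ≤ (line.length:Int) + 1 + 1 by omega]

  by_cases hh : c = '#'
  case neg =>
    have e : (c == '#') = false := by simp [hh]
    have e' : ('#' == c) = false := by simp [Ne.symm hh]
    have es' : (' ' == c) = false := by simp [Ne.symm hsp]
    have hlev : ('#'::'#'::c::line).length - (('#'::'#'::c::line).dropWhile (· == '#')).length = 2 := by
      simp [List.dropWhile, e]
    simp only [pvStepA]
    rw [pvLineB_raw _ (by rw [hlev]; simp [hsp, hh, PySem.List.pyGet?, PySem.List.pyIdx?,
        show ((2:Int)) ≤ (line.length:Int) + 1 + 1 by omega])]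
    simp [PySem.Chars.startswith, List.isPrefixOf, e', es']
  subst hh

  obtain _ | ⟨c, line⟩ := line
  · simp [pvStepA, PySem.Chars.startswith, List.isPrefixOf]
    rw [show pvLineB ['#','#','#'] = [['#','#','#']] from by decide]

  by_cases hsp : c = ' '
  · subst hsp
    have hlev : ('#'::'#'::'#'::' '::line).length - (('#'::'#'::'#'::' '::line).dropWhile (· == '#')).length = 3 := by
      simp [List.dropWhile]
    simp only [pvStepA]
    rw [if_neg (by simp [PySem.Chars.startswith, List.isPrefixOf])]
    rw [if_neg (by simp [PySem.Chars.startswith, List.isPrefixOf])]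
    rw [if_pos (by simp [PySem.Chars.startswith, List.isPrefixOf])]
    rw [PySem.List.slice_from _ (by norm_num)]
    simp only [pvLineB, hlev]
    norm_num
    simp [pv_esc_eq, pvCmdsB, List.lookup, PySem.List.pyGet?, PySem.List.pyIdx?,
      show ((3:Int)) ≤ (line.length:Int) + 1 + 1 + 1 by omega]

  by_cases hh : c = '#'
  case neg =>
    have e : (c == '#') = false := by simp [hh]
    have e' : ('#' == c) = false := by simp [Ne.symm hh]
    have es' : (' ' == c) = false := by simp [Ne.symm hsp]
    have hlev : ('#'::'#'::'#'::c::line).length - (('#'::'#'::'#'::c::line).dropWhile (· == '#')).length = 3 := by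
      simp [List.dropWhile, e]
    simp only [pvStepA]
    rw [pvLineB_raw _ (by rw [hlev]; simp [hsp, hh, PySem.List.pyGet?, PySem.List.pyIdx?,
        show ((3:Int)) ≤ (line.length:Int) + 1 + 1 + 1 by omega])]
    simp [PySem.Chars.startswith, List.isPrefixOf, e', es']
  subst hh

  obtain _ | ⟨c, line⟩ := line
  · simp [pvStepA, PySem.Chars.startswith, List.isPrefixOf]
    rw [show pvLineB ['#','#','#','#'] = [['#','#','#','#']] from by decide]

  by_cases hsp : c = ' '
  · subst hsp
    have hlev : ('#'::'#'::'#'::'#'::' '::line).length - (('#'::'#'::'#'::'#'::' '::line).dropWhile (· == '#')).length = 4 := by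
      simp [List.dropWhile]
    simp only [pvStepA]
    rw [if_neg (by simp [PySem.Chars.startswith, List.isPrefixOf])]
    rw [if_neg (by simp [PySem.Chars.startswith, List.isPrefixOf])]
    rw [if_neg (by simp [PySem.Chars.startswith, List.isPrefixOf])]
    rw [if_pos (by simp [PySem.Chars.startswith, List.isPrefixOf])]
    rw [PySem.List.slice_from _ (by norm_num)]
    simp only [pvLineB, hlev]
    norm_num
    simp [pv_esc_eq, pvCmdsB, List.lookup, PySem.List.pyGet?, PySem.List.pyIdx?,
      show ((4:Int)) ≤ (line.length:Int) + 1 + 1 + 1 + 1 by omega]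

  by_cases hh : c = '#'
  case neg =>
    have e : (c == '#') = false := by simp [hh]
    have e' : ('#' == c) = false := by simp [Ne.symm hh]
    have es' : (' ' == c) = false := by simp [Ne.symm hsp]
    have hlev : ('#'::'#'::'#'::'#'::c::line).length - (('#'::'#'::'#'::'#'::c::line).dropWhile (· == '#')).length = 4 := by
      simp [List.dropWhile, e]
    simp only [pvStepA]
    rw [pvLineB_raw _ (by rw [hlev]; simp [hsp, hh, PySem.List.pyGet?, PySem.List.pyIdx?,
        show ((4:Int)) ≤ (line.length:Int) + 1 + 1 + 1 + 1 by omega])]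
    simp [PySem.Chars.startswith, List.isPrefixOf, e', es']
  subst hh

  have hlev5 : ¬ (('#'::'#'::'#'::'#'::'#'::line).length
      - (('#'::'#'::'#'::'#'::'#'::line).dropWhile (· == '#')).length ≤ 4) := by
    have := List.length_dropWhile_le (fun c => c == '#') line
    simp [List.dropWhile]
    omega
  simp only [pvStepA]
  rw [pvLineB_raw _ (by omega)]
  simp [PySem.Chars.startswith, List.isPrefixOf]
-- ===== VERDICT (by name: the statement is the Claim_ definition above) =====
theorem markdown_to_latex_py_spec : Claim_equal_markdown_to_latex_py := by
  intro md _
  unfold Spec_markdown_to_latex_py markdown_to_latex_py markdown_to_latex_py_alt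
  have hstep : pvStepA = fun res line => res ++ pvLineB line := by
    funext res line; exact pv_step_eq res line
  simp only [hstep, PySem.List.foldl_append_eq_flatMap, pvPreamble, pvPreambleB]
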